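-- pv_equiv track=rewrite | github.com/kbaseapps/kb_gtdbtk | bin/get_taxon_colors.py | get_complete_tax_lineages
-- ===== SOURCE A (Python) =====
-- def get_complete_tax_lineages (tax_lineages, full_parent_lineages, tax_levels_supported):
--     complete_tax_lineages = dict()
--
--     for tax_level in reversed(tax_levels_supported):  # reversed order matters!  want g -> p
--         if tax_level not in tax_lineages:
--             continue
--         for child_taxon in tax_lineages[tax_level].keys():
--             child_tax_level = child_taxon[0]
--             if child_tax_level not in complete_tax_lineages:
--                 complete_tax_lineages[child_tax_level] = dict()
--             if child_taxon not in complete_tax_lineages[child_tax_level]: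
--                 complete_tax_lineages[child_tax_level][child_taxon] = dict()
--
--             # climb
--             this_child_taxon = child_taxon
--             while this_child_taxon in full_parent_lineages:
--                 parent_taxon = full_parent_lineages[this_child_taxon]
--                 parent_tax_level = parent_taxon[0]
--                 if parent_tax_level not in complete_tax_lineages:
--                     complete_tax_lineages[parent_tax_level] = dict()
--                 if parent_taxon not in complete_tax_lineages[parent_tax_level]:
--                     complete_tax_lineages[parent_tax_level][parent_taxon] = dict()
--                 complete_tax_lineages[parent_tax_level][parent_taxon][this_child_taxon] = True
--
--                 this_child_taxon = parent_taxon
--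
--     return complete_tax_lineages
-- ===== SOURCE B (Python) =====
-- def get_complete_tax_lineages(tax_lineages, full_parent_lineages, tax_levels_supported):
--     # Flat-state algorithm: instead of mutating a nested dict-of-dict-of-dicts while
--     # climbing, keep three flat structures (level order, taxa per level, child list per
--     # taxon) plus a memo set of fully-climbed taxa, and assemble the nested result once
--     # at the end.  The memo set lets each parent edge be walked only once overall.
--     levels = []   # insertion order of tax levels
--     taxa = {}     # level -> taxa of that level, in first-recording order
--     kids = {}     # taxon -> its recorded children, in first-recording order
--
--     def record(x):
--         if x not in kids:
--             lv = x[0]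
--             if lv not in taxa:
--                 taxa[lv] = []
--                 levels.append(lv)
--             taxa[lv].append(x)
--             kids[x] = []
--
--     done = set()
--     for tax_level in reversed(tax_levels_supported):
--         if tax_level not in tax_lineages:
--             continue
--         for child_taxon in tax_lineages[tax_level]:
--             record(child_taxon)
--             t = child_taxon
--             while t not in done:
--                 done.add(t)
--                 if t not in full_parent_lineages:
--                     break
--                 p = full_parent_lineages[t]
--                 record(p)
--                 if t not in kids[p]:
--                     kids[p].append(t)
--                 t = p
--
--     return {lv: {x: {c: True for c in kids[x]} for x in taxa[lv]} for lv in levels}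
-- ===== Notes on version B (the rewrite author's own statement) =====
-- stated objective: alternative
-- what changed: B replaces A's in-place mutation of a nested dict-of-dict-of-dicts during each climb by three flat structures (level order list, taxa-per-level dict, children-per-taxon dict) plus a memo set that stops each climb at an already-processed taxon, assembling the nested result once at the end; each parent edge is walked at most once overall.
import Mathlib
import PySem

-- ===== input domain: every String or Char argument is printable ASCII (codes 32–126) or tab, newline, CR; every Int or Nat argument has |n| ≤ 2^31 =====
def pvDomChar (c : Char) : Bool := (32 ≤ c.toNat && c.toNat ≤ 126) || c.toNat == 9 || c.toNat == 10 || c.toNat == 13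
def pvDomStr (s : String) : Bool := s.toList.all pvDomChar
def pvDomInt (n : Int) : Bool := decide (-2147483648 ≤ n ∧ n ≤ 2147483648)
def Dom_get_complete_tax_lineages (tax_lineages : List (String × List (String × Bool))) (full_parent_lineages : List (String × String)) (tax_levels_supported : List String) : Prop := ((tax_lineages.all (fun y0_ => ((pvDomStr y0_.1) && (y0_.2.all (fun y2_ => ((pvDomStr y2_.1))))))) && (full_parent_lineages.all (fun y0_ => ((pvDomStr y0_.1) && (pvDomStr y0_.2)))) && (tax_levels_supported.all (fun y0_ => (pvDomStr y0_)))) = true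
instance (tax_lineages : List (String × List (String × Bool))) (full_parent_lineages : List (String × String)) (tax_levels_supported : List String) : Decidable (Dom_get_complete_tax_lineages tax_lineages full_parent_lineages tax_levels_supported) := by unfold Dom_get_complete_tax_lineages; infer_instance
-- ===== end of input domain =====

-- B replaces A's in-place mutation of a nested dict-of-dict-of-dicts by three flat
-- structures (level order, taxa per level, children per taxon) plus a memo set that
-- stops each climb at an already-processed taxon; the nested result is assembled once
-- at the end (objective: alternative).

-- shared helpers: first-match dict lookup on the association lists, Python s[0] on nonempty strings
def pvLookup (l : List (String × String)) (k : String) : Option String :=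
  (l.find? (fun p => p.1 == k)).map (·.2)

def pvLookupT (l : List (String × List (String × Bool))) (k : String) : Option (List (String × Bool)) :=
  (l.find? (fun p => p.1 == k)).map (·.2)

-- taxon[0] as a 1-char string; "" only on the empty string, which Pre_ excludes where reached
def pvFirst (s : String) : String :=
  match s.toList with
  | [] => ""
  | c :: _ => String.ofList [c]

-- A's nested dict state dict[level, dict[taxon, dict[child, bool]]]
abbrev TDict := PySem.Dict String (PySem.Dict String (PySem.Dict String Bool))

-- ===== PORT A =====
-- A's 'if level not in complete: complete[level] = dict()'
def pvEnsL (acc : TDict) (xl : String) : TDict :=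
  if acc.contains xl then acc else acc.insert xl PySem.Dict.empty

-- the two identical 'ensure level / ensure taxon' if-blocks of A
def pvEnsA (acc : TDict) (x : String) : TDict :=
  if ((pvEnsL acc (pvFirst x)).getD (pvFirst x) PySem.Dict.empty).contains x then
    pvEnsL acc (pvFirst x)
  else (pvEnsL acc (pvFirst x)).modify (pvFirst x) PySem.Dict.empty
    (fun d => d.insert x PySem.Dict.empty)

-- ensure parent, then complete[parent[0]][parent][this] = True (outer keys present, so modify = in-place update)
def pvStepA (acc : TDict) (t p : String) : TDict :=
  (pvEnsA acc p).modify (pvFirst p) PySem.Dict.empty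
    (fun d => d.modify p PySem.Dict.empty (fun dd => dd.insert t true))

-- A's while-loop; fuel only totalizes it (inside Pre_ the chain escapes before fuel runs out)
def pvClimbA (fpl : List (String × String)) : Nat → String → TDict → TDict
  | 0, _, acc => acc
  | fuel + 1, t, acc =>
    match pvLookup fpl t with
    | none => acc
    | some p => pvClimbA fpl fuel p (pvStepA acc t p)

def get_complete_tax_lineages (tax_lineages : List (String × List (String × Bool))) (full_parent_lineages : List (String × String)) (tax_levels_supported : List String) : List (String × List (String × List (String × Bool))) :=
  (tax_levels_supported.reverse.foldl (fun acc lvl =>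
    match pvLookupT tax_lineages lvl with
    | none => acc
    | some children =>
      children.foldl (fun acc cp =>
        pvClimbA full_parent_lineages (full_parent_lineages.length + 1) cp.1
          (pvEnsA acc cp.1)) acc)
    PySem.Dict.empty).items.map (fun q => (q.1, q.2.items.map (fun r => (r.1, r.2.items))))

-- ===== PORT B =====
-- B's flat state: (level insertion order, level -> its taxa in order, taxon -> its recorded children in order)
abbrev FSt := List String × PySem.Dict String (List String) × PySem.Dict String (List String)

-- B's record(x): register a not-yet-seen taxon under its level ('x in kids' = already seen)
def pvRecB (st : FSt) (x : String) : FSt :=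
  if st.2.2.contains x then st
  else
    let s1 : FSt :=
      if st.2.1.contains (pvFirst x) then st
      else (st.1 ++ [pvFirst x], st.2.1.insert (pvFirst x) [], st.2.2)
    (s1.1, s1.2.1.modify (pvFirst x) [] (· ++ [x]), s1.2.2.insert x [])

-- B's 'if t not in kids[p]: kids[p].append(t)'
def pvKidB (st : FSt) (t p : String) : FSt :=
  if (st.2.2.getD p []).contains t then st
  else (st.1, st.2.1, st.2.2.modify p [] (· ++ [t]))

-- B's while-loop with the memo set 'done'
def pvClimbF (fpl : List (String × String)) : Nat → String → FSt → PySem.Set String → FSt × PySem.Set String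
  | 0, _, st, done => (st, done)
  | fuel + 1, t, st, done =>
    if done.contains t then (st, done)
    else match pvLookup fpl t with
      | none => (st, PySem.Set.add done t)
      | some p => pvClimbF fpl fuel p (pvKidB (pvRecB st p) t p) (PySem.Set.add done t)

def get_complete_tax_lineages_alt (tax_lineages : List (String × List (String × Bool))) (full_parent_lineages : List (String × String)) (tax_levels_supported : List String) : List (String × List (String × List (String × Bool))) :=
  let r := tax_levels_supported.reverse.foldl (fun sd lvl =>
    match pvLookupT tax_lineages lvl with
    | none => sd
    | some children =>
      children.foldl (fun sd cp =>
        pvClimbF full_parent_lineages (full_parent_lineages.length + 1) cp.1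
          (pvRecB sd.1 cp.1) sd.2) sd)
    ((([], PySem.Dict.empty, PySem.Dict.empty) : FSt), ([] : PySem.Set String))
  -- final nested comprehension {lv: {x: {c: True for c in kids[x]} for x in taxa[lv]} for lv in levels}
  r.1.1.map (fun lv => (lv,
    (r.1.2.1.getD lv []).map (fun x => (x,
      (r.1.2.2.getD x []).map (fun c => (c, true))))))

-- ===== PRECONDITION & SPEC =====
-- n-fold parent-map iteration (None = escaped); used by Pre_'s acyclicity condition
def pvIter (fpl : List (String × String)) : Nat → Option String → Option String
  | 0, x => x
  | f + 1, x => pvIter fpl f (x.bind (pvLookup fpl))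

-- Pre_ excludes exactly the inputs on which the Python A does not return: a climb started from a
-- child of a processed level that reaches an empty-string taxon (IndexError on taxon[0]) or that
-- never escapes the parent map (a reachable cycle, on which A's while-loop diverges; the pvIter
-- clause is the pigeonhole characterisation of escape from the finite parent map).
def Pre_get_complete_tax_lineages (tax_lineages : List (String × List (String × Bool))) (full_parent_lineages : List (String × String)) (tax_levels_supported : List String) : Prop :=
  ∀ lvl ∈ tax_levels_supported, ∀ c ∈ (pvLookupT tax_lineages lvl).getD [],
    pvIter full_parent_lineages (full_parent_lineages.length + 1) (some c.1) = none ∧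
    ∀ j ∈ List.range (full_parent_lineages.length + 2),
      pvIter full_parent_lineages j (some c.1) ≠ some ""

instance (tax_lineages : List (String × List (String × Bool))) (full_parent_lineages : List (String × String)) (tax_levels_supported : List String) : Decidable (Pre_get_complete_tax_lineages tax_lineages full_parent_lineages tax_levels_supported) := by unfold Pre_get_complete_tax_lineages; infer_instance

def pvWitness_get_complete_tax_lineages : (List (String × List (String × Bool))) × (List (String × String)) × List String :=
  ([("g", [("g__Foo", true)])], [("g__Foo", "f__Bar")], ["f", "g"])

def Spec_get_complete_tax_lineages (tax_lineages : List (String × List (String × Bool))) (full_parent_lineages : List (String × String)) (tax_levels_supported : List String) (out : List (String × List (String × List (String × Bool)))) : Prop := out = get_complete_tax_lineages_alt tax_lineages full_parent_lineages tax_levels_supported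
instance (tax_lineages : List (String × List (String × Bool))) (full_parent_lineages : List (String × String)) (tax_levels_supported : List String) (out : List (String × List (String × List (String × Bool)))) : Decidable (Spec_get_complete_tax_lineages tax_lineages full_parent_lineages tax_levels_supported out) := by unfold Spec_get_complete_tax_lineages; infer_instance

-- ===== CLAIM (what is proved, stated in full; the proofs are below) =====
def Claim_equal_get_complete_tax_lineages : Prop := ∀ (tax_lineages : List (String × List (String × Bool))) (full_parent_lineages : List (String × String)) (tax_levels_supported : List String), Dom_get_complete_tax_lineages tax_lineages full_parent_lineages tax_levels_supported → Pre_get_complete_tax_lineages tax_lineages full_parent_lineages tax_levels_supported → Spec_get_complete_tax_lineages tax_lineages full_parent_lineages tax_levels_supported (get_complete_tax_lineages tax_lineages full_parent_lineages tax_levels_supported)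

-- ===== LEMMAS AND PROOFS =====

-- ---- proof-only: assembling A's nested dict from B's flat state ----

def pvAsm2 (kids : PySem.Dict String (List String)) (xs : List String) : PySem.Dict String (PySem.Dict String Bool) :=
  PySem.Dict.mk (xs.map (fun x => (x, PySem.Dict.mk ((kids.getD x []).map (fun c => (c, true))))))

def pvAsm (st : FSt) : TDict :=
  PySem.Dict.mk (st.1.map (fun lv => (lv, pvAsm2 st.2.2 (st.2.1.getD lv []))))

-- the flat-state invariant B maintains
def FlatInv (st : FSt) : Prop :=
  st.1.Nodup ∧
  st.2.1.keys = st.1 ∧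
  (∀ lv, (st.2.1.getD lv []).Nodup) ∧
  (∀ lv x, x ∈ st.2.1.getD lv [] → pvFirst x = lv) ∧
  (∀ x, st.2.2.contains x = true ↔ x ∈ st.2.1.getD (pvFirst x) []) ∧
  (∀ p, (st.2.2.getD p []).Nodup)

-- ---- proof-only predicates on A's accumulator ----

-- taxon x is recorded: its level entry exists and holds x
def pvEnsured (acc : TDict) (x : String) : Prop :=
  ∃ d, acc.get? (pvFirst x) = some d ∧ (d.get? x).isSome

-- edge t → p is recorded with value True
def pvEdge (acc : TDict) (t p : String) : Prop :=
  ∃ d dd, acc.get? (pvFirst p) = some d ∧ d.get? p = some dd ∧ dd.get? t = some true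

-- every done taxon has its parent recorded, the edge set, and the parent done (chain-closed)
def pvInv (fpl : List (String × String)) (done : List String) (acc : TDict) : Prop :=
  ∀ t ∈ done, ∀ p, pvLookup fpl t = some p → pvEnsured acc p ∧ pvEdge acc t p ∧ p ∈ done

-- mid-climb variant: chain-closed except that a parent may be the current cursor
def pvJ (fpl : List (String × String)) (done : List String) (acc : TDict) (cur : String) : Prop :=
  ∀ t ∈ done, ∀ p, pvLookup fpl t = some p → pvEnsured acc p ∧ pvEdge acc t p ∧ (p ∈ done ∨ p = cur)

-- inner dict (and its inner dicts) have duplicate-free key lists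
def pvWF2 (d : PySem.Dict String (PySem.Dict String Bool)) : Prop :=
  d.keys.Nodup ∧ ∀ p dd, d.get? p = some dd → dd.keys.Nodup

-- all three dict levels have duplicate-free key lists
def pvWF (acc : TDict) : Prop :=
  acc.keys.Nodup ∧ ∀ pl d, acc.get? pl = some d → pvWF2 d

-- recorded facts only grow
def pvMono (a b : TDict) : Prop :=
  (∀ x, pvEnsured a x → pvEnsured b x) ∧ (∀ t p, pvEdge a t p → pvEdge b t p)

-- ---- generic lemmas about dicts built as 'mk (xs.map (fun k => (k, g k)))' ----

lemma pv_get?_mk_map {ν : Type} (xs : List String) (g : String → ν) (x : String) :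
    (PySem.Dict.mk (xs.map (fun k => (k, g k)))).get? x
      = if x ∈ xs then some (g x) else none := by
  induction xs with
  | nil => simp [PySem.Dict.get?]
  | cons a tl ih =>
    rw [List.map_cons, PySem.Dict.get?_mk_cons]
    by_cases h : a = x
    · subst h; simp
    · simp only [beq_iff_eq, h, if_false, ih, List.mem_cons]
      have : ¬ x = a := fun e => h e.symm
      simp [this]

lemma pv_contains_mk_map {ν : Type} (xs : List String) (g : String → ν) (x : String) :
    (PySem.Dict.mk (xs.map (fun k => (k, g k)))).contains x = decide (x ∈ xs) := by
  rw [PySem.Dict.contains_eq_isSome_get?, pv_get?_mk_map]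
  by_cases h : x ∈ xs <;> simp [h]

lemma pv_insert_mk_map_mem {ν : Type} (xs : List String) (g g' : String → ν) (x : String) (v : ν)
    (hmem : x ∈ xs) (hx : g' x = v) (hoth : ∀ k ∈ xs, k ≠ x → g' k = g k) :
    (PySem.Dict.mk (xs.map (fun k => (k, g k)))).insert x v
      = PySem.Dict.mk (xs.map (fun k => (k, g' k))) := by
  have hc : (PySem.Dict.mk (xs.map (fun k => (k, g k)))).contains x = true := by
    rw [pv_contains_mk_map]; simpa using hmem
  apply PySem.Dict.ext
  rw [PySem.Dict.items_insert_of_contains _ _ hc]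
  show (xs.map (fun k => (k, g k))).map (fun p => if p.1 == x then (x, v) else p)
      = xs.map (fun k => (k, g' k))
  rw [List.map_map]
  apply List.map_congr_left
  intro k hk
  by_cases h : k = x
  · subst h; simp [hx.symm]
  · simp [Function.comp, h, hoth k hk h]

lemma pv_insert_mk_map_fresh {ν : Type} (xs : List String) (g g' : String → ν) (x : String) (v : ν)
    (hmem : x ∉ xs) (hx : g' x = v) (hoth : ∀ k ∈ xs, g' k = g k) :
    (PySem.Dict.mk (xs.map (fun k => (k, g k)))).insert x v
      = PySem.Dict.mk ((xs ++ [x]).map (fun k => (k, g' k))) := by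
  have hc : (PySem.Dict.mk (xs.map (fun k => (k, g k)))).contains x = false := by
    rw [pv_contains_mk_map]; simpa using hmem
  apply PySem.Dict.ext
  rw [PySem.Dict.items_insert_of_not_contains _ _ hc]
  show xs.map (fun k => (k, g k)) ++ [(x, v)] = (xs ++ [x]).map (fun k => (k, g' k))
  rw [List.map_append]
  congr 1
  · exact (List.map_congr_left (fun k hk => by rw [hoth k hk])).symm
  · simp [hx.symm]

-- pvAsm2 ignores an insertion that does not change any child list it reads
lemma pvAsm2_congr (kids kids' : PySem.Dict String (List String)) (xs : List String)
    (h : ∀ k ∈ xs, kids'.getD k [] = kids.getD k []) :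
    pvAsm2 kids' xs = pvAsm2 kids xs := by
  unfold pvAsm2
  congr 1
  apply List.map_congr_left
  intro k hk
  rw [h k hk]

-- ---- basic dict lemmas ----

-- in an association list with duplicate-free keys, equal keys force equal pairs
lemma pv_assoc_unique {β : Type} :
    ∀ (l : List (String × β)) (p q : String × β),
      (l.map (fun x => x.1)).Nodup → p ∈ l → q ∈ l → p.1 = q.1 → p = q := by
  intro l
  induction l with
  | nil => intro p q _ hp _ _; cases hp
  | cons a t ih =>
    intro p q hnd hp hq he
    rw [List.map_cons, List.nodup_cons] at hnd
    rcases List.mem_cons.mp hp with hp1 | hp1 <;> rcases List.mem_cons.mp hq with hq1 | hq1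
    · rw [hp1, hq1]
    · exfalso
      apply hnd.1
      rw [← hp1, he]
      exact List.mem_map.mpr ⟨q, hq1, rfl⟩
    · exfalso
      apply hnd.1
      rw [← hq1, ← he]
      exact List.mem_map.mpr ⟨p, hp1, rfl⟩
    · exact ih p q hnd.2 hp1 hq1 he

-- inserting a key with its current value is the identity (needs duplicate-free keys)
lemma pv_insert_eq_self {ν : Type} (d : PySem.Dict String ν) {k : String} {v : ν}
    (h : d.get? k = some v) (hnd : d.keys.Nodup) : d.insert k v = d := by
  have hc : d.contains k = true := by rw [PySem.Dict.contains_eq_isSome_get?, h]; rfl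
  apply PySem.Dict.ext
  rw [PySem.Dict.items_insert_of_contains d v hc]
  have hkv : (k, v) ∈ d.items := PySem.Dict.mem_items_of_get?_eq_some d h
  have hnd' : (d.items.map (fun x => x.1)).Nodup := by
    simpa [PySem.Dict.keys] using hnd
  conv_rhs => rw [← List.map_id d.items]
  apply List.map_congr_left
  intro p hp
  by_cases hpk : p.1 = k
  · have : p = (k, v) := pv_assoc_unique d.items p (k, v) hnd' hp hkv hpk
    simp [this]
  · simp [hpk]

-- ---- monotonicity of recorded facts ----

lemma pvMono_refl (acc : TDict) : pvMono acc acc := ⟨fun _ h => h, fun _ _ h => h⟩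

lemma pvMono_trans {a b c : TDict} (h1 : pvMono a b) (h2 : pvMono b c) : pvMono a c :=
  ⟨fun x h => h2.1 x (h1.1 x h), fun t p h => h2.2 t p (h1.2 t p h)⟩

lemma pvMono_insert_new {acc : TDict} {pl : String} (v : PySem.Dict String (PySem.Dict String Bool))
    (hc : acc.contains pl = false) : pvMono acc (acc.insert pl v) := by
  have hnone : acc.get? pl = none := by
    rw [PySem.Dict.contains_eq_isSome_get?] at hc
    cases hq : acc.get? pl with
    | none => rfl
    | some d => rw [hq] at hc; cases hc
  constructor
  · rintro y ⟨d, hd, hy⟩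
    by_cases h1 : pvFirst y = pl
    · rw [h1, hnone] at hd; cases hd
    · exact ⟨d, by rw [PySem.Dict.get?_insert, if_neg h1]; exact hd, hy⟩
  · rintro t' p' ⟨d, dd, hd, hp, ht⟩
    by_cases h1 : pvFirst p' = pl
    · rw [h1, hnone] at hd; cases hd
    · exact ⟨d, dd, by rw [PySem.Dict.get?_insert, if_neg h1]; exact hd, hp, ht⟩

lemma pvMono_modify_insert {acc : TDict} {pl x : String}
    (hx : (acc.getD pl PySem.Dict.empty).contains x = false) :
    pvMono acc (acc.modify pl PySem.Dict.empty (fun d => d.insert x PySem.Dict.empty)) := by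
  have hxnone : (acc.getD pl PySem.Dict.empty).get? x = none := by
    rw [PySem.Dict.contains_eq_isSome_get?] at hx
    cases hq : (acc.getD pl PySem.Dict.empty).get? x with
    | none => rfl
    | some d => rw [hq] at hx; cases hx
  show pvMono acc (acc.insert pl _)
  constructor
  · rintro y ⟨d, hd, hy⟩
    by_cases h1 : pvFirst y = pl
    · subst h1
      refine ⟨(acc.getD (pvFirst y) PySem.Dict.empty).insert x PySem.Dict.empty,
        PySem.Dict.get?_insert_self _ _ _, ?_⟩
      rw [PySem.Dict.getD_of_get?_eq_some _ _ hd, PySem.Dict.get?_insert]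
      split_ifs with h2
      · rfl
      · exact hy
    · exact ⟨d, by rw [PySem.Dict.get?_insert, if_neg h1]; exact hd, hy⟩
  · rintro t' p' ⟨d, dd, hd, hp, ht⟩
    by_cases h1 : pvFirst p' = pl
    · subst h1
      refine ⟨(acc.getD (pvFirst p') PySem.Dict.empty).insert x PySem.Dict.empty,
        dd, PySem.Dict.get?_insert_self _ _ _, ?_, ht⟩
      rw [PySem.Dict.getD_of_get?_eq_some _ _ hd] at hxnone ⊢
      rw [PySem.Dict.get?_insert]
      split_ifs with h2
      · rw [h2] at hp; rw [hp] at hxnone; cases hxnone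
      · exact hp
    · exact ⟨d, dd, by rw [PySem.Dict.get?_insert, if_neg h1]; exact hd, hp, ht⟩

lemma pvMono_edge (acc : TDict) (pl p t : String) :
    pvMono acc (acc.modify pl PySem.Dict.empty
      (fun d => d.modify p PySem.Dict.empty (fun dd => dd.insert t true))) := by
  show pvMono acc (acc.insert pl _)
  constructor
  · rintro y ⟨d, hd, hy⟩
    by_cases h1 : pvFirst y = pl
    · subst h1
      refine ⟨_, PySem.Dict.get?_insert_self _ _ _, ?_⟩
      rw [PySem.Dict.getD_of_get?_eq_some _ _ hd]
      show ((d.insert p ((fun dd => dd.insert t true) (d.getD p PySem.Dict.empty))).get? y).isSome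
        = true
      rw [PySem.Dict.get?_insert]
      split_ifs with h2
      · rfl
      · exact hy
    · exact ⟨d, by rw [PySem.Dict.get?_insert, if_neg h1]; exact hd, hy⟩
  · rintro t' p' ⟨d, dd, hd, hp, ht⟩
    by_cases h1 : pvFirst p' = pl
    · subst h1
      have hv : (fun d => d.modify p PySem.Dict.empty fun dd => dd.insert t true)
          (PySem.Dict.getD acc (pvFirst p') PySem.Dict.empty)
          = d.insert p ((d.getD p PySem.Dict.empty).insert t true) := by
        rw [PySem.Dict.getD_of_get?_eq_some _ _ hd]
        rfl
      rw [hv]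
      by_cases h2 : p' = p
      · subst h2
        refine ⟨_, (d.getD p' PySem.Dict.empty).insert t true,
          PySem.Dict.get?_insert_self _ _ _, PySem.Dict.get?_insert_self _ _ _, ?_⟩
        rw [PySem.Dict.getD_of_get?_eq_some _ _ hp, PySem.Dict.get?_insert]
        split_ifs with h3
        · rfl
        · exact ht
      · refine ⟨_, dd, PySem.Dict.get?_insert_self _ _ _, ?_, ht⟩
        rw [PySem.Dict.get?_insert, if_neg h2]
        exact hp
    · exact ⟨d, dd, by rw [PySem.Dict.get?_insert, if_neg h1]; exact hd, hp, ht⟩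

lemma pvMono_ensL (acc : TDict) (xl : String) : pvMono acc (pvEnsL acc xl) := by
  unfold pvEnsL
  split_ifs with hc
  · exact pvMono_refl acc
  · exact pvMono_insert_new _ (by simpa using hc)

lemma pvMono_ensA (acc : TDict) (x : String) : pvMono acc (pvEnsA acc x) := by
  unfold pvEnsA
  split_ifs with hx
  · exact pvMono_ensL acc _
  · exact pvMono_trans (pvMono_ensL acc _) (pvMono_modify_insert (by simpa using hx))

lemma pvMono_stepA (acc : TDict) (t p : String) : pvMono acc (pvStepA acc t p) :=
  pvMono_trans (pvMono_ensA acc p) (pvMono_edge (pvEnsA acc p) (pvFirst p) p t)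

-- ---- what a step records ----

lemma pvEnsured_ensA (acc : TDict) (x : String) : pvEnsured (pvEnsA acc x) x := by
  unfold pvEnsA
  split_ifs with hx
  · have h2 : (((pvEnsL acc (pvFirst x)).getD (pvFirst x) PySem.Dict.empty).get? x).isSome
        = true := by
      rw [← PySem.Dict.contains_eq_isSome_get?]; exact hx
    cases hq : (pvEnsL acc (pvFirst x)).get? (pvFirst x) with
    | none =>
      rw [PySem.Dict.getD_of_get?_eq_none _ _ hq, PySem.Dict.get?_empty] at h2; cases h2
    | some d =>
      rw [PySem.Dict.getD_of_get?_eq_some _ _ hq] at h2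
      exact ⟨d, hq, h2⟩
  · refine ⟨_, PySem.Dict.get?_insert_self _ _ _, ?_⟩
    rw [PySem.Dict.get?_insert_self]
    rfl

lemma pvStepA_facts (acc : TDict) (t p : String) :
    pvEnsured (pvStepA acc t p) p ∧ pvEdge (pvStepA acc t p) t p := by
  obtain ⟨d, hd, hp⟩ := pvEnsured_ensA acc p
  obtain ⟨dd, hdd⟩ := Option.isSome_iff_exists.mp hp
  unfold pvStepA
  show pvEnsured ((pvEnsA acc p).insert (pvFirst p) _) p ∧
    pvEdge ((pvEnsA acc p).insert (pvFirst p) _) t p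
  rw [PySem.Dict.getD_of_get?_eq_some _ _ hd]
  show pvEnsured ((pvEnsA acc p).insert (pvFirst p) (d.insert p _)) p ∧
    pvEdge ((pvEnsA acc p).insert (pvFirst p) (d.insert p _)) t p
  rw [PySem.Dict.getD_of_get?_eq_some _ _ hdd]
  constructor
  · refine ⟨_, PySem.Dict.get?_insert_self _ _ _, ?_⟩
    rw [PySem.Dict.get?_insert_self]; rfl
  · exact ⟨_, _, PySem.Dict.get?_insert_self _ _ _, PySem.Dict.get?_insert_self _ _ _,
      PySem.Dict.get?_insert_self _ _ _⟩

-- ---- a step from an already-recorded edge changes nothing ----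

lemma pv_noop_stepA {acc : TDict} {t p : String} (hWF : pvWF acc) (hEdge : pvEdge acc t p) :
    pvStepA acc t p = acc := by
  obtain ⟨d, dd, hd, hp, ht⟩ := hEdge
  have hcl : acc.contains (pvFirst p) = true := by
    rw [PySem.Dict.contains_eq_isSome_get?, hd]; rfl
  have hcp : d.contains p = true := by
    rw [PySem.Dict.contains_eq_isSome_get?, hp]; rfl
  have hL : pvEnsL acc (pvFirst p) = acc := by
    unfold pvEnsL; rw [if_pos hcl]
  have hens : pvEnsA acc p = acc := by
    unfold pvEnsA
    rw [hL, PySem.Dict.getD_of_get?_eq_some _ _ hd, if_pos hcp]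
  unfold pvStepA
  rw [hens]
  show acc.insert (pvFirst p) ((acc.getD (pvFirst p) PySem.Dict.empty).insert p
    (((acc.getD (pvFirst p) PySem.Dict.empty).getD p PySem.Dict.empty).insert t true)) = acc
  rw [PySem.Dict.getD_of_get?_eq_some _ _ hd, PySem.Dict.getD_of_get?_eq_some _ _ hp]
  have hnd : d.keys.Nodup := (hWF.2 _ _ hd).1
  have hndd : dd.keys.Nodup := (hWF.2 _ _ hd).2 _ _ hp
  rw [pv_insert_eq_self dd ht hndd, pv_insert_eq_self d hp hnd, pv_insert_eq_self acc hd hWF.1]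

lemma pv_noop_climbA (fpl : List (String × String)) (done : List String) :
    ∀ (fuel : Nat) (t : String) (acc : TDict), pvWF acc → pvInv fpl done acc → t ∈ done →
      pvClimbA fpl fuel t acc = acc := by
  intro fuel
  induction fuel with
  | zero => intro t acc _ _ _; rfl
  | succ fuel ih =>
    intro t acc hWF hInv ht
    show (match pvLookup fpl t with
      | none => acc
      | some p => pvClimbA fpl fuel p (pvStepA acc t p)) = acc
    cases hlk : pvLookup fpl t with
    | none => rfl
    | some p =>
      obtain ⟨hE, hEd, hpd⟩ := hInv t ht p hlk
      show pvClimbA fpl fuel p (pvStepA acc t p) = acc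
      rw [pv_noop_stepA hWF hEd]
      exact ih p acc hWF hInv hpd

-- ---- FlatInv gives well-formedness of the assembled dict ----

lemma pv_asm_get? (st : FSt) (pl : String) :
    (pvAsm st).get? pl
      = if pl ∈ st.1 then some (pvAsm2 st.2.2 (st.2.1.getD pl [])) else none :=
  pv_get?_mk_map st.1 (fun l => pvAsm2 st.2.2 (st.2.1.getD l [])) pl

lemma pv_asm2_get? (kids : PySem.Dict String (List String)) (xs : List String) (x : String) :
    (pvAsm2 kids xs).get? x
      = if x ∈ xs then
          some (PySem.Dict.mk ((kids.getD x []).map (fun c => (c, true)))) else none :=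
  pv_get?_mk_map xs (fun y => PySem.Dict.mk ((kids.getD y []).map (fun c => (c, true)))) x

lemma pv_asm_keys (st : FSt) : (pvAsm st).keys = st.1 := by
  simp [pvAsm, PySem.Dict.keys, List.map_map, Function.comp_def]

lemma pv_asm2_keys (kids : PySem.Dict String (List String)) (xs : List String) :
    (pvAsm2 kids xs).keys = xs := by
  simp [pvAsm2, PySem.Dict.keys, List.map_map, Function.comp_def]

lemma pvWF_asm {st : FSt} (hI : FlatInv st) : pvWF (pvAsm st) := by
  obtain ⟨hnd, hkeys, htnd, hfst, hiff, hknd⟩ := hI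
  constructor
  · rw [pv_asm_keys]; exact hnd
  · intro pl d hd
    rw [pv_asm_get?] at hd
    split_ifs at hd with hmem
    · cases hd
      constructor
      · rw [pv_asm2_keys]; exact htnd pl
      · intro p dd hdd
        rw [pv_asm2_get?] at hdd
        split_ifs at hdd with hm2
        cases hdd
        simpa [PySem.Dict.keys, List.map_map, Function.comp_def] using hknd p

-- ---- record simulation: A's ensure = B's record through pvAsm ----

lemma pv_taxa_mem_levels {st : FSt} (hI : FlatInv st) {lv : String}
    (h : st.2.1.getD lv [] ≠ []) : lv ∈ st.1 := by
  by_contra hlv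
  have hc : st.2.1.contains lv = false := by
    rw [PySem.Dict.contains_eq_decide_mem_keys, hI.2.1]
    simpa using hlv
  exact h (PySem.Dict.getD_of_not_contains _ _ hc)

lemma pv_asm_contains (st : FSt) (pl : String) :
    (pvAsm st).contains pl = decide (pl ∈ st.1) :=
  pv_contains_mk_map st.1 (fun l => pvAsm2 st.2.2 (st.2.1.getD l [])) pl

lemma pv_asm2_contains (kids : PySem.Dict String (List String)) (xs : List String) (x : String) :
    (pvAsm2 kids xs).contains x = decide (x ∈ xs) :=
  pv_contains_mk_map xs (fun y => PySem.Dict.mk ((kids.getD y []).map (fun c => (c, true)))) x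

lemma pv_asm_getD {st : FSt} {pl : String} (h : pl ∈ st.1) :
    (pvAsm st).getD pl PySem.Dict.empty = pvAsm2 st.2.2 (st.2.1.getD pl []) := by
  apply PySem.Dict.getD_of_get?_eq_some
  rw [pv_asm_get?, if_pos h]

lemma pv_asm2_getD {kids : PySem.Dict String (List String)} {xs : List String} {x : String}
    (h : x ∈ xs) :
    (pvAsm2 kids xs).getD x PySem.Dict.empty
      = PySem.Dict.mk ((kids.getD x []).map (fun c => (c, true))) := by
  apply PySem.Dict.getD_of_get?_eq_some
  rw [pv_asm2_get?, if_pos h]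

-- the inner-dict insert of an existing child with value True is the identity
lemma pv_inner_insert_mem {ks : List String} {t : String} (h : t ∈ ks) :
    (PySem.Dict.mk (ks.map (fun c => (c, true)))).insert t true
      = PySem.Dict.mk (ks.map (fun c => (c, true))) :=
  pv_insert_mk_map_mem ks (fun _ => true) (fun _ => true) t true h rfl (fun _ _ _ => rfl)

lemma pv_inner_insert_fresh {ks : List String} {t : String} (h : t ∉ ks) :
    (PySem.Dict.mk (ks.map (fun c => (c, true)))).insert t true
      = PySem.Dict.mk ((ks ++ [t]).map (fun c => (c, true))) :=
  pv_insert_mk_map_fresh ks (fun _ => true) (fun _ => true) t true h rfl (fun _ _ => rfl)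

-- specialised insert lemmas in pvAsm2 / pvAsm form (so they match goals syntactically)
lemma pvAsm2_insert (kids kids' : PySem.Dict String (List String)) (xs : List String)
    (x : String) (v : PySem.Dict String Bool) (hmem : x ∈ xs)
    (hv : PySem.Dict.mk ((kids'.getD x []).map (fun c => (c, true))) = v)
    (hoth : ∀ k ∈ xs, k ≠ x → kids'.getD k [] = kids.getD k []) :
    (pvAsm2 kids xs).insert x v = pvAsm2 kids' xs :=
  pv_insert_mk_map_mem xs
    (fun y => PySem.Dict.mk ((kids.getD y []).map (fun c => (c, true))))
    (fun y => PySem.Dict.mk ((kids'.getD y []).map (fun c => (c, true))))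
    x v hmem hv (fun k hk hkx => by dsimp only; rw [hoth k hk hkx])

lemma pvAsm2_insert_fresh (kids kids' : PySem.Dict String (List String)) (xs : List String)
    (x : String) (v : PySem.Dict String Bool) (hmem : x ∉ xs)
    (hv : PySem.Dict.mk ((kids'.getD x []).map (fun c => (c, true))) = v)
    (hoth : ∀ k ∈ xs, kids'.getD k [] = kids.getD k []) :
    (pvAsm2 kids xs).insert x v = pvAsm2 kids' (xs ++ [x]) :=
  pv_insert_mk_map_fresh xs
    (fun y => PySem.Dict.mk ((kids.getD y []).map (fun c => (c, true))))
    (fun y => PySem.Dict.mk ((kids'.getD y []).map (fun c => (c, true))))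
    x v hmem hv (fun k hk => by dsimp only; rw [hoth k hk])

lemma pvAsm_insert (st : FSt) (T' K' : PySem.Dict String (List String)) (lv : String)
    (v : PySem.Dict String (PySem.Dict String Bool)) (hmem : lv ∈ st.1)
    (hv : pvAsm2 K' (T'.getD lv []) = v)
    (hoth : ∀ l ∈ st.1, l ≠ lv → pvAsm2 K' (T'.getD l []) = pvAsm2 st.2.2 (st.2.1.getD l [])) :
    (pvAsm st).insert lv v = pvAsm (st.1, T', K') :=
  pv_insert_mk_map_mem st.1
    (fun l => pvAsm2 st.2.2 (st.2.1.getD l []))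
    (fun l => pvAsm2 K' (T'.getD l []))
    lv v hmem hv hoth

lemma pvAsm_insert_fresh (st : FSt) (T' K' : PySem.Dict String (List String)) (lv : String)
    (v : PySem.Dict String (PySem.Dict String Bool)) (hmem : lv ∉ st.1)
    (hv : pvAsm2 K' (T'.getD lv []) = v)
    (hoth : ∀ l ∈ st.1, pvAsm2 K' (T'.getD l []) = pvAsm2 st.2.2 (st.2.1.getD l [])) :
    (pvAsm st).insert lv v = pvAsm (st.1 ++ [lv], T', K') :=
  pv_insert_mk_map_fresh st.1
    (fun l => pvAsm2 st.2.2 (st.2.1.getD l []))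
    (fun l => pvAsm2 K' (T'.getD l []))
    lv v hmem hv hoth

lemma pv_kid_sim (st : FSt) (t p : String) (hI : FlatInv st) (hp : st.2.2.contains p = true) :
    (pvAsm st).modify (pvFirst p) PySem.Dict.empty
      (fun d => d.modify p PySem.Dict.empty (fun dd => dd.insert t true))
      = pvAsm (pvKidB st t p) ∧ FlatInv (pvKidB st t p) := by
  obtain ⟨hnd, hkeys, htnd, hfst, hiff, hknd⟩ := hI
  have hpx : p ∈ st.2.1.getD (pvFirst p) [] := (hiff p).mp hp
  have hpl : pvFirst p ∈ st.1 :=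
    pv_taxa_mem_levels ⟨hnd, hkeys, htnd, hfst, hiff, hknd⟩ (by intro h0; rw [h0] at hpx; cases hpx)
  have hmod : (pvAsm st).modify (pvFirst p) PySem.Dict.empty
      (fun d => d.modify p PySem.Dict.empty (fun dd => dd.insert t true))
      = (pvAsm st).insert (pvFirst p)
          ((pvAsm2 st.2.2 (st.2.1.getD (pvFirst p) [])).insert p
            ((PySem.Dict.mk ((st.2.2.getD p []).map (fun c => (c, true)))).insert t true)) := by
    show (pvAsm st).insert (pvFirst p) _ = _
    rw [pv_asm_getD hpl]
    show (pvAsm st).insert (pvFirst p)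
        ((pvAsm2 st.2.2 (st.2.1.getD (pvFirst p) [])).insert p
          (((pvAsm2 st.2.2 (st.2.1.getD (pvFirst p) [])).getD p PySem.Dict.empty).insert t true))
      = _
    rw [pv_asm2_getD hpx]
  by_cases hkt : t ∈ st.2.2.getD p []
  · -- child already recorded: both sides change nothing
    have hK : pvKidB st t p = st := by
      unfold pvKidB
      rw [if_pos (List.contains_iff_mem.mpr hkt)]
    rw [hK, hmod, pv_inner_insert_mem hkt,
      pvAsm2_insert st.2.2 st.2.2 _ p _ hpx rfl (fun _ _ _ => rfl)]
    refine ⟨?_, hnd, hkeys, htnd, hfst, hiff, hknd⟩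
    have := pvAsm_insert st st.2.1 st.2.2 (pvFirst p) _ hpl rfl (fun _ _ _ => rfl)
    rw [this]
  · -- new child: append on the flat side, in-place nested insert on A's side
    have hK : pvKidB st t p
        = (st.1, st.2.1, st.2.2.insert p (st.2.2.getD p [] ++ [t])) := by
      unfold pvKidB
      rw [if_neg (by
        intro hcc
        exact hkt (List.contains_iff_mem.mp hcc))]
      simp only [PySem.Dict.modify]
    have hKgetD : ∀ y, y ≠ p →
        (st.2.2.insert p (st.2.2.getD p [] ++ [t])).getD y [] = st.2.2.getD y [] := by
      intro y hy
      exact PySem.Dict.getD_insert_of_ne _ _ _ hy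
    have hKself : (st.2.2.insert p (st.2.2.getD p [] ++ [t])).getD p []
        = st.2.2.getD p [] ++ [t] := PySem.Dict.getD_insert_self _ _ _ _
    constructor
    · rw [hK, hmod, pv_inner_insert_fresh hkt,
        pvAsm2_insert st.2.2 (st.2.2.insert p (st.2.2.getD p [] ++ [t])) _ p _ hpx
          (by rw [hKself]) (fun k _ hkp => hKgetD k hkp),
        pvAsm_insert st st.2.1 (st.2.2.insert p (st.2.2.getD p [] ++ [t])) (pvFirst p) _ hpl rfl
          (fun l _ hlp => pvAsm2_congr _ _ _
            (fun k hk => hKgetD k (fun e => hlp (by rw [← (hfst l k hk), e]))))]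
    · rw [hK]
      refine ⟨hnd, hkeys, htnd, hfst, ?_, ?_⟩
      · intro y
        show (st.2.2.insert p _).contains y = true ↔ _
        rw [PySem.Dict.contains_insert]
        by_cases hyp : y = p
        · subst hyp
          simp only [BEq.rfl, Bool.true_or]
          exact ⟨fun _ => hpx, fun _ => trivial⟩
        · have : (y == p) = false := beq_eq_false_iff_ne.mpr hyp
          rw [this, Bool.false_or]
          exact hiff y
      · intro q
        by_cases hqp : q = p
        · subst hqp
          rw [hKself]
          exact List.Nodup.append (hknd q) (List.nodup_singleton t)
            (by simpa using hkt)
        · rw [hKgetD q hqp]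
          exact hknd q

lemma pv_rec_sim (st : FSt) (x : String) (hI : FlatInv st) :
    pvEnsA (pvAsm st) x = pvAsm (pvRecB st x) ∧ FlatInv (pvRecB st x) ∧
      (pvRecB st x).2.2.contains x = true := by
  obtain ⟨hnd, hkeys, htnd, hfst, hiff, hknd⟩ := hI
  by_cases hseen : st.2.2.contains x = true
  · -- already recorded: both sides are the identity
    have hxx : x ∈ st.2.1.getD (pvFirst x) [] := (hiff x).mp hseen
    have hlvL : pvFirst x ∈ st.1 :=
      pv_taxa_mem_levels ⟨hnd, hkeys, htnd, hfst, hiff, hknd⟩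
        (by intro h0; rw [h0] at hxx; cases hxx)
    have hREC : pvRecB st x = st := by
      unfold pvRecB; rw [if_pos hseen]
    have hcl : (pvAsm st).contains (pvFirst x) = true := by
      rw [pv_asm_contains]; simpa using hlvL
    have hensL : pvEnsL (pvAsm st) (pvFirst x) = pvAsm st := by
      unfold pvEnsL; rw [if_pos hcl]
    have hcx : (pvAsm2 st.2.2 (st.2.1.getD (pvFirst x) [])).contains x = true := by
      rw [pv_asm2_contains]; simpa using hxx
    have hens : pvEnsA (pvAsm st) x = pvAsm st := by
      unfold pvEnsA
      rw [hensL, pv_asm_getD hlvL, if_pos hcx]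
    rw [hREC, hens]
    exact ⟨rfl, ⟨hnd, hkeys, htnd, hfst, hiff, hknd⟩, hseen⟩
  · have hseen' : st.2.2.contains x = false := by
      cases h : st.2.2.contains x
      · rfl
      · exact absurd h hseen
    have hxx : x ∉ st.2.1.getD (pvFirst x) [] := by
      intro h
      rw [(hiff x).mpr h] at hseen'
      cases hseen'
    -- invariant pieces common to both subcases
    have hKoth : ∀ k, k ≠ x → (st.2.2.insert x []).getD k [] = st.2.2.getD k [] :=
      fun k hk => PySem.Dict.getD_insert_of_ne _ _ _ hk
    have hKx : (st.2.2.insert x []).getD x [] = [] := PySem.Dict.getD_insert_self _ _ _ _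
    have hKcong : ∀ l, l ≠ pvFirst x →
        pvAsm2 (st.2.2.insert x []) (st.2.1.getD l []) = pvAsm2 st.2.2 (st.2.1.getD l []) := by
      intro l hl
      apply pvAsm2_congr
      intro k hk
      exact hKoth k (fun e => hl (by rw [← hfst l k hk, e]))
    have hKiff : ∀ y, y ≠ x → ((st.2.2.insert x []).contains y = st.2.2.contains y) := by
      intro y hy
      rw [PySem.Dict.contains_insert, beq_eq_false_iff_ne.mpr hy, Bool.false_or]
    by_cases hlvT : st.2.1.contains (pvFirst x) = true
    · -- level already present: append x to its taxa list
      have hlvL : pvFirst x ∈ st.1 := by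
        rw [PySem.Dict.contains_eq_decide_mem_keys, hkeys] at hlvT
        simpa using hlvT
      have hREC : pvRecB st x
          = (st.1, st.2.1.insert (pvFirst x) (st.2.1.getD (pvFirst x) [] ++ [x]),
             st.2.2.insert x []) := by
        unfold pvRecB
        rw [if_neg (by rw [hseen']; exact Bool.false_ne_true), if_pos hlvT]
        simp only [PySem.Dict.modify]
      have hToth : ∀ l, l ≠ pvFirst x →
          (st.2.1.insert (pvFirst x) (st.2.1.getD (pvFirst x) [] ++ [x])).getD l []
            = st.2.1.getD l [] :=
        fun l hl => PySem.Dict.getD_insert_of_ne _ _ _ hl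
      have hTself : (st.2.1.insert (pvFirst x) (st.2.1.getD (pvFirst x) [] ++ [x])).getD
          (pvFirst x) [] = st.2.1.getD (pvFirst x) [] ++ [x] :=
        PySem.Dict.getD_insert_self _ _ _ _
      have hcl : (pvAsm st).contains (pvFirst x) = true := by
        rw [pv_asm_contains]; simpa using hlvL
      have hensL : pvEnsL (pvAsm st) (pvFirst x) = pvAsm st := by
        unfold pvEnsL; rw [if_pos hcl]
      have hcx : (pvAsm2 st.2.2 (st.2.1.getD (pvFirst x) [])).contains x = false := by
        rw [pv_asm2_contains]; simpa using hxx
      refine ⟨?_, ?_, ?_⟩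
      · unfold pvEnsA
        rw [hensL, pv_asm_getD hlvL, if_neg (by rw [hcx]; exact Bool.false_ne_true)]
        simp only [PySem.Dict.modify]
        rw [pv_asm_getD hlvL, hREC,
          pvAsm2_insert_fresh st.2.2 (st.2.2.insert x []) _ x PySem.Dict.empty hxx
            (by rw [hKx]; rfl) (fun k hk => hKoth k (fun e => hxx (e ▸ hk)))]
        exact pvAsm_insert st _ _ (pvFirst x) _ hlvL (by rw [hTself])
          (fun l _ hl => by rw [hToth l hl]; exact hKcong l hl)
      · rw [hREC]
        refine ⟨hnd, ?_, ?_, ?_, ?_, ?_⟩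
        · rw [PySem.Dict.keys_insert_of_contains _ _ hlvT]
          exact hkeys
        · intro l
          by_cases hl : l = pvFirst x
          · subst hl
            rw [hTself]
            exact List.Nodup.append (htnd _) (List.nodup_singleton x) (by simpa using hxx)
          · rw [hToth l hl]
            exact htnd l
        · intro l k hk
          by_cases hl : l = pvFirst x
          · subst hl
            rw [hTself] at hk
            rcases List.mem_append.mp hk with h1 | h1
            · exact hfst _ k h1
            · rw [List.mem_singleton.mp h1]
          · rw [hToth l hl] at hk
            exact hfst l k hk
        · intro y
          by_cases hy : y = x
          · subst hy
            rw [PySem.Dict.contains_insert_self, hTself]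
            simp
          · rw [hKiff y hy]
            by_cases hl : pvFirst y = pvFirst x
            · rw [hl, hTself]
              rw [hiff y, hl]
              constructor
              · exact fun h => List.mem_append.mpr (Or.inl h)
              · intro h
                rcases List.mem_append.mp h with h1 | h1
                · exact h1
                · exact absurd (List.mem_singleton.mp h1) hy
            · rw [hToth _ hl]
              exact hiff y
        · intro q
          by_cases hq : q = x
          · subst hq
            rw [hKx]
            exact List.nodup_nil
          · rw [hKoth q hq]
            exact hknd q
      · rw [hREC]
        exact PySem.Dict.contains_insert_self _ _ _
    · -- new level: append it to the level list
      have hlvT' : st.2.1.contains (pvFirst x) = false := by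
        cases h : st.2.1.contains (pvFirst x)
        · rfl
        · exact absurd h hlvT
      have hlvL : pvFirst x ∉ st.1 := by
        rw [PySem.Dict.contains_eq_decide_mem_keys, hkeys] at hlvT'
        simpa using hlvT'
      have hTnil : st.2.1.getD (pvFirst x) [] = [] :=
        PySem.Dict.getD_of_not_contains _ _ hlvT'
      have hREC : pvRecB st x
          = (st.1 ++ [pvFirst x], st.2.1.insert (pvFirst x) [x], st.2.2.insert x []) := by
        unfold pvRecB
        rw [if_neg (by rw [hseen']; exact Bool.false_ne_true),
          if_neg (by rw [hlvT']; exact Bool.false_ne_true)]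
        simp only [PySem.Dict.modify, PySem.Dict.getD_insert_self,
          PySem.Dict.insert_insert_self, List.nil_append]
      have hToth : ∀ l, l ≠ pvFirst x →
          (st.2.1.insert (pvFirst x) [x]).getD l [] = st.2.1.getD l [] :=
        fun l hl => PySem.Dict.getD_insert_of_ne _ _ _ hl
      have hTself : (st.2.1.insert (pvFirst x) [x]).getD (pvFirst x) [] = [x] :=
        PySem.Dict.getD_insert_self _ _ _ _
      have hcl : (pvAsm st).contains (pvFirst x) = false := by
        rw [pv_asm_contains]; simpa using hlvL
      have hensL : pvEnsL (pvAsm st) (pvFirst x)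
          = (pvAsm st).insert (pvFirst x) PySem.Dict.empty := by
        unfold pvEnsL; rw [if_neg (by rw [hcl]; exact Bool.false_ne_true)]
      refine ⟨?_, ?_, ?_⟩
      · unfold pvEnsA
        rw [hensL, PySem.Dict.getD_insert_self,
          if_neg (by rw [PySem.Dict.contains_empty]; exact Bool.false_ne_true)]
        simp only [PySem.Dict.modify, PySem.Dict.getD_insert_self,
          PySem.Dict.insert_insert_self]
        rw [hREC]
        refine pvAsm_insert_fresh st _ _ (pvFirst x) _ hlvL ?_ ?_
        · rw [hTself]
          unfold pvAsm2
          rw [List.map_cons, List.map_nil, hKx]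
          rfl
        · intro l hl
          rw [hToth l (fun e => hlvL (e ▸ hl))]
          exact hKcong l (fun e => hlvL (e ▸ hl))
      · rw [hREC]
        refine ⟨?_, ?_, ?_, ?_, ?_, ?_⟩
        · rw [List.nodup_append]
          refine ⟨hnd, List.nodup_singleton _, ?_⟩
          intro a ha b hb
          rw [List.mem_singleton.mp hb]
          exact fun e => hlvL (e ▸ ha)
        · rw [PySem.Dict.keys_insert_of_not_contains _ _ hlvT', hkeys]
        · intro l
          by_cases hl : l = pvFirst x
          · subst hl
            rw [hTself]
            exact List.nodup_singleton x
          · rw [hToth l hl]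
            exact htnd l
        · intro l k hk
          by_cases hl : l = pvFirst x
          · subst hl
            rw [hTself] at hk
            rw [List.mem_singleton.mp hk]
          · rw [hToth l hl] at hk
            exact hfst l k hk
        · intro y
          by_cases hy : y = x
          · subst hy
            rw [PySem.Dict.contains_insert_self, hTself]
            simp
          · rw [hKiff y hy]
            by_cases hl : pvFirst y = pvFirst x
            · rw [hl, hTself]
              rw [hiff y, hl, hTnil]
              constructor
              · intro h; cases h
              · intro h
                exact absurd (List.mem_singleton.mp h) hy
            · rw [hToth _ hl]
              exact hiff y
        · intro q
          by_cases hq : q = x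
          · subst hq
            rw [hKx]
            exact List.nodup_nil
          · rw [hKoth q hq]
            exact hknd q
      · rw [hREC]
        exact PySem.Dict.contains_insert_self _ _ _

lemma pv_step_sim (st : FSt) (t p : String) (hI : FlatInv st) :
    pvStepA (pvAsm st) t p = pvAsm (pvKidB (pvRecB st p) t p) ∧
      FlatInv (pvKidB (pvRecB st p) t p) := by
  obtain ⟨he, hI1, hc⟩ := pv_rec_sim st p hI
  obtain ⟨he2, hI2⟩ := pv_kid_sim (pvRecB st p) t p hI1 hc
  exact ⟨by unfold pvStepA; rw [he, he2], hI2⟩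

-- ---- invariant plumbing ----

lemma pvInv_of_J {fpl : List (String × String)} {done : List String} {acc : TDict} {t : String}
    (hJ : pvJ fpl done acc t) (ht : t ∈ done) : pvInv fpl done acc := by
  intro u hu p hlk
  obtain ⟨h1, h2, h3⟩ := hJ u hu p hlk
  exact ⟨h1, h2, h3.elim id (fun e => e ▸ ht)⟩

lemma pvJ_of_Inv {fpl : List (String × String)} {done : List String} {acc : TDict} (c : String)
    (hI : pvInv fpl done acc) : pvJ fpl done acc c := by
  intro u hu p hlk
  obtain ⟨h1, h2, h3⟩ := hI u hu p hlk
  exact ⟨h1, h2, Or.inl h3⟩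

lemma pvInv_mono {fpl : List (String × String)} {done : List String} {acc acc' : TDict}
    (hm : pvMono acc acc') (hI : pvInv fpl done acc) : pvInv fpl done acc' := by
  intro u hu p hlk
  obtain ⟨h1, h2, h3⟩ := hI u hu p hlk
  exact ⟨hm.1 _ h1, hm.2 _ _ h2, h3⟩

-- ---- the climbs agree through pvAsm and preserve the invariants ----

lemma pv_climb_sim (fpl : List (String × String)) :
    ∀ (fuel : Nat) (t : String) (st : FSt) (done : PySem.Set String),
      pvIter fpl fuel (some t) = none → FlatInv st → pvJ fpl done (pvAsm st) t →
      pvClimbA fpl fuel t (pvAsm st) = pvAsm (pvClimbF fpl fuel t st done).1 ∧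
      FlatInv (pvClimbF fpl fuel t st done).1 ∧
      pvInv fpl (pvClimbF fpl fuel t st done).2 (pvAsm (pvClimbF fpl fuel t st done).1) := by
  intro fuel
  induction fuel with
  | zero =>
    intro t st done hIt
    exact absurd hIt (by simp [pvIter])
  | succ fuel ih =>
    intro t st done hIt hFI hJ
    by_cases hd : t ∈ done
    · have hcont : done.contains t = true := List.contains_iff_mem.mpr hd
      have hB : pvClimbF fpl (fuel + 1) t st done = (st, done) := by
        show (if done.contains t = true then (st, done)
          else match pvLookup fpl t with
            | none => (st, PySem.Set.add done t)
            | some p => pvClimbF fpl fuel p (pvKidB (pvRecB st p) t p) (PySem.Set.add done t))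
          = (st, done)
        rw [hcont, if_pos rfl]
      have hInv := pvInv_of_J hJ hd
      rw [hB]
      exact ⟨pv_noop_climbA fpl done (fuel + 1) t (pvAsm st) (pvWF_asm hFI) hInv hd, hFI, hInv⟩
    · have hcont : done.contains t = false := by
        rw [Bool.eq_false_iff]
        intro hc
        exact hd (List.contains_iff_mem.mp hc)
      cases hlk : pvLookup fpl t with
      | none =>
        have hB : pvClimbF fpl (fuel + 1) t st done = (st, PySem.Set.add done t) := by
          show (if done.contains t = true then (st, done)
            else match pvLookup fpl t with
              | none => (st, PySem.Set.add done t)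
              | some p => pvClimbF fpl fuel p (pvKidB (pvRecB st p) t p) (PySem.Set.add done t))
            = (st, PySem.Set.add done t)
          rw [hcont, if_neg Bool.false_ne_true, hlk]
        have hA : pvClimbA fpl (fuel + 1) t (pvAsm st) = pvAsm st := by
          show (match pvLookup fpl t with
            | none => pvAsm st
            | some p => pvClimbA fpl fuel p (pvStepA (pvAsm st) t p)) = pvAsm st
          rw [hlk]
        rw [hA, hB]
        refine ⟨rfl, hFI, ?_⟩
        intro u hu p hlkp
        rcases (PySem.Set.mem_add done t u).mp hu with hu1 | hu1
        · obtain ⟨h1, h2, h3⟩ := hJ u hu1 p hlkp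
          refine ⟨h1, h2, (PySem.Set.mem_add done t p).mpr ?_⟩
          exact h3.imp id id
        · subst hu1
          rw [hlk] at hlkp
          cases hlkp
      | some p =>
        have hIt2 : pvIter fpl fuel (some p) = none := by
          have h0 : pvIter fpl (fuel + 1) (some t) = pvIter fpl fuel (pvLookup fpl t) := rfl
          rw [h0, hlk] at hIt
          exact hIt
        obtain ⟨hstep, hFI1⟩ := pv_step_sim st t p hFI
        have hJ1 : pvJ fpl (PySem.Set.add done t) (pvStepA (pvAsm st) t p) p := by
          intro u hu q hlkq
          rcases (PySem.Set.mem_add done t u).mp hu with hu1 | hu1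
          · obtain ⟨h1, h2, h3⟩ := hJ u hu1 q hlkq
            refine ⟨(pvMono_stepA (pvAsm st) t p).1 _ h1,
              (pvMono_stepA (pvAsm st) t p).2 _ _ h2, ?_⟩
            exact Or.inl ((PySem.Set.mem_add done t q).mpr (h3.imp id id))
          · rw [hu1, hlk] at hlkq
            injection hlkq with hq
            subst hq
            rw [hu1]
            exact ⟨(pvStepA_facts (pvAsm st) t p).1, (pvStepA_facts (pvAsm st) t p).2, Or.inr rfl⟩
        rw [hstep] at hJ1
        have hrec := ih p (pvKidB (pvRecB st p) t p) (PySem.Set.add done t) hIt2 hFI1 hJ1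
        have hA : pvClimbA fpl (fuel + 1) t (pvAsm st)
            = pvClimbA fpl fuel p (pvStepA (pvAsm st) t p) := by
          show (match pvLookup fpl t with
            | none => pvAsm st
            | some p => pvClimbA fpl fuel p (pvStepA (pvAsm st) t p))
            = pvClimbA fpl fuel p (pvStepA (pvAsm st) t p)
          rw [hlk]
        have hB : pvClimbF fpl (fuel + 1) t st done
            = pvClimbF fpl fuel p (pvKidB (pvRecB st p) t p) (PySem.Set.add done t) := by
          show (if done.contains t = true then (st, done)
            else match pvLookup fpl t with
              | none => (st, PySem.Set.add done t)
              | some p => pvClimbF fpl fuel p (pvKidB (pvRecB st p) t p) (PySem.Set.add done t))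
            = pvClimbF fpl fuel p (pvKidB (pvRecB st p) t p) (PySem.Set.add done t)
          rw [hcont, if_neg Bool.false_ne_true, hlk]
        rw [hA, hB, hstep]
        exact hrec

-- ---- the per-level child loops agree ----

lemma pv_fold_children (fpl : List (String × String)) :
    ∀ (cs : List (String × Bool)) (st : FSt) (done : PySem.Set String),
      (∀ c ∈ cs, pvIter fpl (fpl.length + 1) (some c.1) = none) →
      FlatInv st → pvInv fpl done (pvAsm st) →
      (cs.foldl (fun acc cp => pvClimbA fpl (fpl.length + 1) cp.1 (pvEnsA acc cp.1)) (pvAsm st)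
        = pvAsm (cs.foldl (fun sd cp =>
            pvClimbF fpl (fpl.length + 1) cp.1 (pvRecB sd.1 cp.1) sd.2) (st, done)).1) ∧
      FlatInv (cs.foldl (fun sd cp =>
        pvClimbF fpl (fpl.length + 1) cp.1 (pvRecB sd.1 cp.1) sd.2) (st, done)).1 ∧
      pvInv fpl
        (cs.foldl (fun sd cp =>
          pvClimbF fpl (fpl.length + 1) cp.1 (pvRecB sd.1 cp.1) sd.2) (st, done)).2
        (pvAsm (cs.foldl (fun sd cp =>
          pvClimbF fpl (fpl.length + 1) cp.1 (pvRecB sd.1 cp.1) sd.2) (st, done)).1) := by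
  intro cs
  induction cs with
  | nil => intro st done _ hFI hInv; exact ⟨rfl, hFI, hInv⟩
  | cons c cs ih =>
    intro st done hGood hFI hInv
    simp only [List.foldl_cons]
    obtain ⟨he, hFIa, hc⟩ := pv_rec_sim st c.1 hFI
    rw [he]
    have hJa : pvJ fpl done (pvAsm (pvRecB st c.1)) c.1 := by
      refine pvJ_of_Inv c.1 (pvInv_mono ?_ hInv)
      rw [← he]
      exact pvMono_ensA (pvAsm st) c.1
    obtain ⟨he2, hw, hi⟩ :=
      pv_climb_sim fpl (fpl.length + 1) c.1 (pvRecB st c.1) done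
        (hGood c (List.mem_cons_self ..)) hFIa hJa
    rw [he2]
    have := ih (pvClimbF fpl (fpl.length + 1) c.1 (pvRecB st c.1) done).1
      (pvClimbF fpl (fpl.length + 1) c.1 (pvRecB st c.1) done).2
      (fun c' hc' => hGood c' (List.mem_cons_of_mem _ hc')) hw hi
    simpa using this

-- ---- the level loops agree ----

lemma pv_fold_levels (fpl : List (String × String))
    (tl : List (String × List (String × Bool))) :
    ∀ (ls : List String) (st : FSt) (done : PySem.Set String),
      (∀ lvl ∈ ls, ∀ c ∈ (pvLookupT tl lvl).getD [],
        pvIter fpl (fpl.length + 1) (some c.1) = none) →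
      FlatInv st → pvInv fpl done (pvAsm st) →
      (ls.foldl (fun acc lvl =>
          match pvLookupT tl lvl with
          | none => acc
          | some children =>
            children.foldl
              (fun acc cp => pvClimbA fpl (fpl.length + 1) cp.1 (pvEnsA acc cp.1)) acc)
          (pvAsm st)
        = pvAsm (ls.foldl (fun sd lvl =>
            match pvLookupT tl lvl with
            | none => sd
            | some children =>
              children.foldl
                (fun sd cp => pvClimbF fpl (fpl.length + 1) cp.1 (pvRecB sd.1 cp.1) sd.2) sd)
            (st, done)).1) ∧
      FlatInv (ls.foldl (fun sd lvl =>
          match pvLookupT tl lvl with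
          | none => sd
          | some children =>
            children.foldl
              (fun sd cp => pvClimbF fpl (fpl.length + 1) cp.1 (pvRecB sd.1 cp.1) sd.2) sd)
          (st, done)).1 ∧
      pvInv fpl
        (ls.foldl (fun sd lvl =>
            match pvLookupT tl lvl with
            | none => sd
            | some children =>
              children.foldl
                (fun sd cp => pvClimbF fpl (fpl.length + 1) cp.1 (pvRecB sd.1 cp.1) sd.2) sd)
          (st, done)).2
        (pvAsm (ls.foldl (fun sd lvl =>
            match pvLookupT tl lvl with
            | none => sd
            | some children =>
              children.foldl
                (fun sd cp => pvClimbF fpl (fpl.length + 1) cp.1 (pvRecB sd.1 cp.1) sd.2) sd)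
          (st, done)).1) := by
  intro ls
  induction ls with
  | nil => intro st done _ hFI hInv; exact ⟨rfl, hFI, hInv⟩
  | cons l ls ih =>
    intro st done hPre hFI hInv
    have hPre' : ∀ lvl ∈ ls, ∀ c ∈ (pvLookupT tl lvl).getD [],
        pvIter fpl (fpl.length + 1) (some c.1) = none :=
      fun lvl hlvl => hPre lvl (List.mem_cons_of_mem _ hlvl)
    simp only [List.foldl_cons]
    cases hlk : pvLookupT tl l with
    | none => exact ih st done hPre' hFI hInv
    | some children =>
      dsimp only
      have hGood : ∀ c ∈ children, pvIter fpl (fpl.length + 1) (some c.1) = none := by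
        intro c hc
        have := hPre l (List.mem_cons_self ..) c
        rw [hlk] at this
        exact this hc
      obtain ⟨he, hw, hi⟩ := pv_fold_children fpl children st done hGood hFI hInv
      rw [he]
      have := ih
        (children.foldl
          (fun sd cp => pvClimbF fpl (fpl.length + 1) cp.1 (pvRecB sd.1 cp.1) sd.2)
          (st, done)).1
        (children.foldl
          (fun sd cp => pvClimbF fpl (fpl.length + 1) cp.1 (pvRecB sd.1 cp.1) sd.2)
          (st, done)).2 hPre' hw hi
      simpa using this

lemma pvFlatInv_init : FlatInv ([], PySem.Dict.empty, PySem.Dict.empty) := by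
  refine ⟨List.nodup_nil, ?_, ?_, ?_, ?_, ?_⟩
  · rw [PySem.Dict.keys_empty]
  · intro lv; rw [PySem.Dict.getD_empty]; exact List.nodup_nil
  · intro lv x h; rw [PySem.Dict.getD_empty] at h; cases h
  · intro x
    rw [PySem.Dict.contains_empty, PySem.Dict.getD_empty]
    simp
  · intro p; rw [PySem.Dict.getD_empty]; exact List.nodup_nil

lemma pvInv_nil (fpl : List (String × String)) (acc : TDict) : pvInv fpl [] acc := by
  intro u hu; cases hu

-- ===== VERDICT (by name: the statement is the Claim_ definition above) =====
theorem get_complete_tax_lineages_spec : Claim_equal_get_complete_tax_lineages := by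
  unfold Claim_equal_get_complete_tax_lineages Spec_get_complete_tax_lineages
  intro tl fpl tls _hDom hPre
  have hPreR : ∀ lvl ∈ tls.reverse, ∀ c ∈ (pvLookupT tl lvl).getD [],
      pvIter fpl (fpl.length + 1) (some c.1) = none :=
    fun lvl hlvl c hc => (hPre lvl (List.mem_reverse.mp hlvl) c hc).1
  unfold get_complete_tax_lineages get_complete_tax_lineages_alt
  have hA0 : pvAsm ([], PySem.Dict.empty, PySem.Dict.empty) = PySem.Dict.empty := rfl
  obtain ⟨he, -, -⟩ :=
    pv_fold_levels fpl tl tls.reverse ([], PySem.Dict.empty, PySem.Dict.empty) [] hPreR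
      pvFlatInv_init (pvInv_nil fpl _)
  rw [hA0] at he
  rw [he]
  simp [pvAsm, pvAsm2, List.map_map, Function.comp]
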